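-- pv_equiv track=rewrite | github.com/michael-borck/bowling-wpa-analysis | src/scoring.py | score_traditional_partial
-- ===== SOURCE A (Python) =====
-- def score_traditional_partial(balls):
--     """
--     Score a partial game under traditional rules.
--
--     Returns a tuple (score, pending_bonuses) where:
--       - score: the score so far (counting only fully resolved frames)
--       - pending_bonuses: number of future balls still needed to resolve
--         the current frame's bonus
--
--     Useful for computing win probability at mid-game states.
--     """
--     score = 0
--     i = 0
--     frames_scored = 0
--
--     for frame in range(10):
--         if i >= len(balls):
--             break
--         if frame < 9:
--             if balls[i] == 10:  # strike
--                 if i + 2 < len(balls):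
--                     score += 10 + balls[i+1] + balls[i+2]
--                     frames_scored += 1
--                 else:
--                     break  # can't fully score this frame yet
--                 i += 1
--             else:
--                 if i + 1 >= len(balls):
--                     break
--                 if balls[i] + balls[i+1] == 10:  # spare
--                     if i + 2 < len(balls):
--                         score += 10 + balls[i+2]
--                         frames_scored += 1
--                     else:
--                         break
--                 else:
--                     score += balls[i] + balls[i+1]
--                     frames_scored += 1
--                 i += 2
--         else:  # frame 10
--             if balls[i] == 10:
--                 if i + 2 < len(balls):
--                     score += 10 + balls[i+1] + balls[i+2]
--                     frames_scored += 1
--                 else: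
--                     break
--             else:
--                 if i + 1 >= len(balls):
--                     break
--                 if balls[i] + balls[i+1] == 10:
--                     if i + 2 < len(balls):
--                         score += 10 + balls[i+2]
--                         frames_scored += 1
--                     else:
--                         break
--                 else:
--                     score += balls[i] + balls[i+1]
--                     frames_scored += 1
--
--     return score, frames_scored
-- ===== SOURCE B (Python) =====
-- def score_traditional_partial(balls):
--     n = len(balls)
--     # pass 1: frame start indices (advance 1 on strike, 2 otherwise)
--     starts = []
--     i = 0
--     while len(starts) < 10 and i < n:
--         starts.append(i)
--         i += 1 if balls[i] == 10 else 2
--     # pass 2: score each frame whose bonus balls are all available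
--     score = 0
--     frames_scored = 0
--     for s in starts:
--         if balls[s] == 10:
--             if s + 2 >= n:
--                 break
--             score += 10 + balls[s+1] + balls[s+2]
--         elif s + 1 >= n:
--             break
--         elif balls[s] + balls[s+1] == 10:
--             if s + 2 >= n:
--                 break
--             score += 10 + balls[s+2]
--         else:
--             score += balls[s] + balls[s+1]
--         frames_scored += 1
--     return score, frames_scored
-- ===== Notes on version B (the rewrite author's own statement) =====
-- stated objective: alternative
-- what changed: Replaces A's single interleaved scan-and-score loop over range(10) with two separate passes: first build the list of per-frame starting indices, then score those frames until a frame's bonus balls are missing.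
import Mathlib
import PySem

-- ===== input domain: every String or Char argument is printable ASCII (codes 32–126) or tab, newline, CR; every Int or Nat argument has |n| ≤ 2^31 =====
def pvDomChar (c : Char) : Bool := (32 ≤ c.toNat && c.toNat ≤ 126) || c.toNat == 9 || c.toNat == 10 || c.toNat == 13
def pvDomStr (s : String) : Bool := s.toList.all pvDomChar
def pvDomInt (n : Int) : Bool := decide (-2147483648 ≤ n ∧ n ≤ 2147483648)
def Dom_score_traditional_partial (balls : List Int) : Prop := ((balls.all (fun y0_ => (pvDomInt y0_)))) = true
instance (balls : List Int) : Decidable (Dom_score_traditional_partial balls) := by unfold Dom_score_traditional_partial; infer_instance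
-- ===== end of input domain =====

-- B replaces A's interleaved scan-and-score loop by two passes (frame-start table, then scoring);
-- objective: alternative decomposition, same cost.

-- ===== PORT A =====
-- A's for-loop over range(10) with breaks, as fuel recursion (fuel = frames remaining;
-- fuel 1 is the 'frame == 9' last iteration, fuel ≥ 2 the 'frame < 9' iterations).
def pvA_go (balls : List Int) : Nat → Nat → Int → Int → Int × Int
  | 0, _, score, frames => (score, frames)
  | 1, i, score, frames =>
    if i ≥ balls.length then (score, frames)
    else if balls.getD i 0 = 10 then
      if i + 2 < balls.length then
        (score + 10 + balls.getD (i+1) 0 + balls.getD (i+2) 0, frames + 1)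
      else (score, frames)
    else if i + 1 ≥ balls.length then (score, frames)
    else if balls.getD i 0 + balls.getD (i+1) 0 = 10 then
      if i + 2 < balls.length then (score + 10 + balls.getD (i+2) 0, frames + 1)
      else (score, frames)
    else (score + balls.getD i 0 + balls.getD (i+1) 0, frames + 1)
  | (m+2), i, score, frames =>
    if i ≥ balls.length then (score, frames)
    else if balls.getD i 0 = 10 then
      if i + 2 < balls.length then
        pvA_go balls (m+1) (i+1) (score + 10 + balls.getD (i+1) 0 + balls.getD (i+2) 0) (frames + 1)
      else (score, frames)
    else if i + 1 ≥ balls.length then (score, frames)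
    else if balls.getD i 0 + balls.getD (i+1) 0 = 10 then
      if i + 2 < balls.length then
        pvA_go balls (m+1) (i+2) (score + 10 + balls.getD (i+2) 0) (frames + 1)
      else (score, frames)
    else pvA_go balls (m+1) (i+2) (score + balls.getD i 0 + balls.getD (i+1) 0) (frames + 1)

def score_traditional_partial (balls : List Int) : Int × Int :=
  pvA_go balls 10 0 0 0

-- ===== PORT B =====
-- pass 1: frame start indices (advance 1 on strike, 2 otherwise), at most 10 frames
def pvB_starts (balls : List Int) : Nat → Nat → List Nat
  | 0, _ => []
  | (k+1), i =>
    if i < balls.length then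
      i :: pvB_starts balls k (if balls.getD i 0 = 10 then i + 1 else i + 2)
    else []

-- pass 2: score each listed frame while its bonus balls are available, else break
def pvB_score (balls : List Int) : List Nat → Int → Int → Int × Int
  | [], score, frames => (score, frames)
  | s :: rest, score, frames =>
    if balls.getD s 0 = 10 then
      if s + 2 ≥ balls.length then (score, frames)
      else pvB_score balls rest (score + 10 + balls.getD (s+1) 0 + balls.getD (s+2) 0) (frames + 1)
    else if s + 1 ≥ balls.length then (score, frames)
    else if balls.getD s 0 + balls.getD (s+1) 0 = 10 then
      if s + 2 ≥ balls.length then (score, frames)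
      else pvB_score balls rest (score + 10 + balls.getD (s+2) 0) (frames + 1)
    else pvB_score balls rest (score + balls.getD s 0 + balls.getD (s+1) 0) (frames + 1)

def score_traditional_partial_alt (balls : List Int) : Int × Int :=
  pvB_score balls (pvB_starts balls 10 0) 0 0

-- ===== PRECONDITION & SPEC =====
def Spec_score_traditional_partial (balls : List Int) (out : Int × Int) : Prop := out = score_traditional_partial_alt balls
instance (balls : List Int) (out : Int × Int) : Decidable (Spec_score_traditional_partial balls out) := by unfold Spec_score_traditional_partial; infer_instance

-- ===== CLAIM (what is proved, stated in full; the proofs are below) =====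
def Claim_equal_score_traditional_partial : Prop := ∀ (balls : List Int), Dom_score_traditional_partial balls → Spec_score_traditional_partial balls (score_traditional_partial balls)

-- ===== LEMMAS AND PROOFS =====
theorem pvAB_eq (balls : List Int) (k i : Nat) (score frames : Int) :
    pvA_go balls (k+1) i score frames
      = pvB_score balls (pvB_starts balls (k+1) i) score frames := by
  induction k generalizing i score frames with
  | zero =>
    simp only [pvA_go, pvB_starts]
    by_cases hi : i < balls.length
    · simp only [hi, if_pos, pvB_score]
      split_ifs <;> simp <;> omega
    · simp [pvB_score, hi, Nat.le_of_not_lt hi]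
  | succ m ih =>
    simp only [pvA_go, pvB_starts]
    by_cases hi : i < balls.length
    · simp only [hi, if_pos, pvB_score]
      split_ifs <;> (try omega) <;> (try rw [ih]) <;>
        (try rw [show pvB_starts balls (m+1) (i+2) = [] from by
              simp only [pvB_starts]; rw [if_neg]; omega]) <;>
        simp_all [pvB_starts]
    · simp [pvB_score, hi, Nat.le_of_not_lt hi]

-- ===== VERDICT (by name: the statement is the Claim_ definition above) =====
theorem score_traditional_partial_spec : Claim_equal_score_traditional_partial := by
  intro balls _
  unfold Spec_score_traditional_partial score_traditional_partial score_traditional_partial_alt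
  exact pvAB_eq balls 9 0 0 0
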